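-- pv_equiv track=rewrite | github.com/Miktos-Universe/miktos-ai-bridge-platform | core/optimization_engine.py | _find_independent_steps
-- ===== SOURCE A (Python) =====
-- from typing import Dict, List, Any, Optional, Callable, Tuple
--
-- def _find_independent_steps(dependencies: List[List[int]]) -> List[List[int]]:
--     """Find groups of independent steps that can run in parallel"""
--     # Simplified dependency analysis
--     # In a real implementation, this would use graph algorithms
--     independent_groups = []
--
--     # For now, just return groups of steps without dependencies
--     used_steps = set()
--     for i, deps in enumerate(dependencies):
--         if not deps and i not in used_steps:
--             group = [i]
--             # Find other steps with no dependencies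
--             for j, other_deps in enumerate(dependencies[i+1:], i+1):
--                 if not other_deps and j not in used_steps:
--                     group.append(j)
--
--             if len(group) > 1:
--                 independent_groups.append(group)
--                 used_steps.update(group)
--
--     return independent_groups
-- ===== SOURCE B (Python) =====
-- def _find_independent_steps(dependencies):
--     independent = [i for i, deps in enumerate(dependencies) if not deps]
--     return [independent] if len(independent) > 1 else []
-- ===== Notes on version B (the rewrite author's own statement) =====
-- stated objective: simpler
-- what changed: Replaced the outer loop with inner rescan and used_steps bookkeeping by a single comprehension collecting all empty-dependency indices, returned as one group when there are more than one.
import Mathlib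
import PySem

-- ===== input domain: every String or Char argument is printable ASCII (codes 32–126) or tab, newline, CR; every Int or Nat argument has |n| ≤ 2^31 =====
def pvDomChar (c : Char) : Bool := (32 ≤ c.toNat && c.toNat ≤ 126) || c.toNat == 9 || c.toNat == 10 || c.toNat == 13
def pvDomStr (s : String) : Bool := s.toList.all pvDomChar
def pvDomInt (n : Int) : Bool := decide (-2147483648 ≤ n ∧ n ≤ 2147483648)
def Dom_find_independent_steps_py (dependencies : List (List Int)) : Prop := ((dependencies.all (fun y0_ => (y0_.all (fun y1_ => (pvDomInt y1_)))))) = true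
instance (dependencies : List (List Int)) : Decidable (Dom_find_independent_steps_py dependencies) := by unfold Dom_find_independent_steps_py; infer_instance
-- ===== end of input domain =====

-- B replaces A's used_steps/inner-scan loop by one comprehension collecting the
-- empty-dependency indices, wrapped in a single group when there are more than one (objective: simpler).

-- ===== PORT A =====
-- inner loop: `for j, other_deps in enumerate(dependencies[i+1:], i+1): …` — `rest` IS dependencies[i+1:] here
def pvInnerA (rest : List (List Int)) (j : Int) (used : PySem.Set Int) (group : List Int) : List Int :=
  match rest with
  | [] => group
  | other_deps :: rest' =>
      if other_deps = [] ∧ ¬ (PySem.Set.contains used j = true) then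
        pvInnerA rest' (j + 1) used (group ++ [j])
      else
        pvInnerA rest' (j + 1) used group

-- outer loop: `for i, deps in enumerate(dependencies): …`; at index i, `rest'` = dependencies[i+1:]
def pvOuterA (rest : List (List Int)) (i : Int) (used : PySem.Set Int)
    (independent_groups : List (List Int)) : List (List Int) :=
  match rest with
  | [] => independent_groups
  | deps :: rest' =>
      if deps = [] ∧ ¬ (PySem.Set.contains used i = true) then
        let group := pvInnerA rest' (i + 1) used [i]
        if group.length > 1 then
          pvOuterA rest' (i + 1) (PySem.Set.update used group) (independent_groups ++ [group])
        else
          pvOuterA rest' (i + 1) used independent_groups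
      else
        pvOuterA rest' (i + 1) used independent_groups

def find_independent_steps_py (dependencies : List (List Int)) : List (List Int) :=
  pvOuterA dependencies 0 PySem.Set.empty []

-- ===== PORT B =====
def find_independent_steps_py_alt (dependencies : List (List Int)) : List (List Int) :=
  let independent := (PySem.List.enumerate dependencies).filterMap
    (fun p => if p.2 = [] then some p.1 else none)
  if independent.length > 1 then [independent] else []

-- ===== PRECONDITION & SPEC =====
def Spec_find_independent_steps_py (dependencies : List (List Int)) (out : List (List Int)) : Prop := out = find_independent_steps_py_alt dependencies
instance (dependencies : List (List Int)) (out : List (List Int)) : Decidable (Spec_find_independent_steps_py dependencies out) := by unfold Spec_find_independent_steps_py; infer_instance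

-- ===== CLAIM (what is proved, stated in full; the proofs are below) =====
def Claim_equal_find_independent_steps_py : Prop := ∀ (dependencies : List (List Int)), Dom_find_independent_steps_py dependencies → Spec_find_independent_steps_py dependencies (find_independent_steps_py dependencies)

-- ===== LEMMAS AND PROOFS =====

/-- absolute indices (starting at `i`) of the empty-dependency entries of `rest` -/
def pvE (i : Int) : List (List Int) → List Int
  | [] => []
  | d :: r => if d = [] then i :: pvE (i + 1) r else pvE (i + 1) r

theorem pvAlt_eq_pvE (xs : List (List Int)) (i : Int) :
    (PySem.List.enumerate xs i).filterMap (fun p => if p.2 = [] then some p.1 else none) = pvE i xs := by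
  induction xs generalizing i with
  | nil => simp [pvE, PySem.List.enumerate_nil]
  | cons d r ih =>
      simp only [PySem.List.enumerate_cons, List.filterMap_cons, pvE]
      split_ifs <;> simp [ih]

theorem pvInnerA_empty (rest : List (List Int)) (j : Int) (g : List Int) :
    pvInnerA rest j PySem.Set.empty g = g ++ pvE j rest := by
  induction rest generalizing j g with
  | nil => simp [pvInnerA, pvE]
  | cons d r ih =>
      rw [show pvInnerA (d :: r) j PySem.Set.empty g =
            (if d = [] ∧ ¬ (PySem.Set.contains PySem.Set.empty j = true) then
              pvInnerA r (j + 1) PySem.Set.empty (g ++ [j])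
            else pvInnerA r (j + 1) PySem.Set.empty g) from rfl]
      have hc : PySem.Set.contains PySem.Set.empty j = false := rfl
      by_cases hd : d = []
      · rw [if_pos ⟨hd, by rw [hc]; simp⟩, ih]; simp [pvE, hd]
      · rw [if_neg (fun h => hd h.1), ih]; simp [pvE, hd]

theorem pvOuterA_saturated (rest : List (List Int)) (i : Int) (used : PySem.Set Int)
    (acc : List (List Int)) (h : ∀ x ∈ pvE i rest, x ∈ used) :
    pvOuterA rest i used acc = acc := by
  induction rest generalizing i with
  | nil => rfl
  | cons d r ih =>
      simp only [pvOuterA]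
      by_cases hd : d = []
      · have hi : i ∈ used := h i (by simp [pvE, hd])
        have hc : PySem.Set.contains used i = true := (PySem.Set.contains_iff used i).2 hi
        simp only [hd, hc]
        simp only [not_true, and_false, if_false]
        exact ih (i + 1) (fun x hx => h x (by simp [pvE, hd, hx]))
      · simp only [hd, false_and, if_false]
        exact ih (i + 1) (fun x hx => h x (by simp [pvE, hd, hx]))

theorem pvOuterA_fresh (rest : List (List Int)) (i : Int) :
    pvOuterA rest i PySem.Set.empty [] =
      if (pvE i rest).length > 1 then [pvE i rest] else [] := by
  induction rest generalizing i with
  | nil => rfl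
  | cons d r ih =>
      simp only [pvOuterA]
      by_cases hd : d = []
      · have hc : PySem.Set.contains PySem.Set.empty i = false := rfl
        simp only [hd, hc]
        simp only [Bool.false_eq_true, not_false_iff, and_true, if_true]
        have hg : pvInnerA r (i + 1) PySem.Set.empty [i] = i :: pvE (i + 1) r := by
          simpa using pvInnerA_empty r (i + 1) [i]
        rw [hg]
        by_cases hlen : (i :: pvE (i + 1) r).length > 1
        · simp only [hlen, if_true]
          rw [pvOuterA_saturated r (i + 1) _ _ ?_]
          · have : pvE i (d :: r) = i :: pvE (i + 1) r := by simp [pvE, hd]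
            simp only [show pvE i ([] :: r) = i :: pvE (i + 1) r from by simp [pvE], hlen, if_true, List.nil_append]
          · intro x hx
            have : x ∈ PySem.Set.ofList (i :: pvE (i + 1) r) := (PySem.Set.mem_ofList _ _).2 (by simp [hx])
            simpa [PySem.Set.update_nil_left] using this
        · simp only [hlen, if_false]
          have hnil : pvE (i + 1) r = [] := by
            apply List.eq_nil_of_length_eq_zero
            simp only [List.length_cons, gt_iff_lt, not_lt] at hlen
            omega
          rw [ih (i + 1)]
          simp only [show pvE i ([] :: r) = i :: pvE (i + 1) r from by simp [pvE]]
          simp [hnil]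
      · simp only [hd, false_and, if_false]
        rw [ih (i + 1)]
        have : pvE i (d :: r) = pvE (i + 1) r := by simp [pvE, hd]
        simp [this]

-- ===== VERDICT (by name: the statement is the Claim_ definition above) =====
theorem find_independent_steps_py_spec : Claim_equal_find_independent_steps_py := by
  intro deps _
  unfold Spec_find_independent_steps_py find_independent_steps_py find_independent_steps_py_alt
  rw [pvOuterA_fresh deps 0, pvAlt_eq_pvE deps 0]
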